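-- pv_equiv track=rewrite | github.com/hyein-song/algo_study | BOJ/21609/21609.py | select_block_group
-- ===== SOURCE A (Python) =====
-- def select_block_group(positions):
--     can = []
--     for idx, position in enumerate(positions):
--         rainbow = 0
--         row = []
--         col = []
--         for pp in position:
--             if pp[2] == 0:
--                 rainbow += 1
--             else:
--                 row.append(pp[0])
--                 col.append(pp[1])
--
--         can.append([idx,len(position),rainbow,min(row),min(col)])
--     can = sorted(can, key = lambda x: (x[2],x[3],x[4]), reverse=True)
--
--     return positions[can[0][0]]
-- ===== SOURCE B (Python) =====
-- def select_block_group(positions):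
--     best_key = None
--     best_pos = None
--     for position in positions:
--         rainbow = sum(1 for pp in position if pp[2] == 0)
--         rows = [pp[0] for pp in position if pp[2] != 0]
--         cols = [pp[1] for pp in position if pp[2] != 0]
--         key = (rainbow, min(rows), min(cols))
--         if best_key is None or key > best_key:
--             best_key = key
--             best_pos = position
--     return best_pos
-- ===== Notes on version B (the rewrite author's own statement) =====
-- stated objective: simpler
-- what changed: B replaces A's build-a-summary-list-then-stable-reverse-sort-then-index selection by a single running-best pass that keeps the first group whose (rainbow, min row, min col) key is strictly greater than the current best, returning that group directly.
-- outside the precondition, e.g. on select_block_group([]): A raises IndexError, B returns None; on select_block_group([[(1, 2, 0)]]): A raises ValueError, B raises ValueError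
import Mathlib
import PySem

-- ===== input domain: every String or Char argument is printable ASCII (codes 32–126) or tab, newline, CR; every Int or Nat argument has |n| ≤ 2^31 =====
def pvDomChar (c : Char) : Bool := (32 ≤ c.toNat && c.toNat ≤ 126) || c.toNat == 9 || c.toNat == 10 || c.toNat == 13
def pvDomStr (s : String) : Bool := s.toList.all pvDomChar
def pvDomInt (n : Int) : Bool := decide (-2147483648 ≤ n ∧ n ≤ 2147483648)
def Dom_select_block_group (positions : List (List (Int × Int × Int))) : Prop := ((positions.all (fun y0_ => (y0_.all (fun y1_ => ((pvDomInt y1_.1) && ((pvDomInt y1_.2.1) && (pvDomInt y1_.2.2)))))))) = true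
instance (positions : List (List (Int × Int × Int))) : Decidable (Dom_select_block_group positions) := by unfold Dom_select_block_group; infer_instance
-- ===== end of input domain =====

-- B replaces A's build-summary-list-then-stable-reverse-sort selection by a single running-best
-- pass (strict '>' on the lex key, so the first-occurring maximal group wins, as in A).

-- ===== PORT A =====
-- literal port of A; min(row)/min(col) raise ValueError on all-rainbow (or empty) groups and
-- can[0] raises IndexError on empty input — those inputs are excluded by Pre_ (getD below is dead there)
def select_block_group (positions : List (List (Int × Int × Int))) : List (Int × Int × Int) :=
  let can : List (Int × Int × Int × Int × Int) :=
    (PySem.List.enumerate positions).foldl (fun can p =>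
      let idx := p.1
      let position := p.2
      let s : Int × List Int × List Int :=
        position.foldl (fun s pp =>
          if pp.2.2 = 0 then (s.1 + 1, s.2.1, s.2.2)
          else (s.1, s.2.1 ++ [pp.1], s.2.2 ++ [pp.2.1])) (0, [], [])
      can ++ [(idx, (position.length : Int), s.1,
               (PySem.List.min? s.2.1 (fun x => x)).getD 0,
               (PySem.List.min? s.2.2 (fun x => x)).getD 0)]) []
  let can := PySem.List.sorted can
      (fun x => toLex (x.2.2.1, toLex (x.2.2.2.1, x.2.2.2.2))) true
  (PySem.List.pyGet? positions (can.headD (0,0,0,0,0)).1).getD []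

-- ===== PORT B =====
-- hand port of Python's tuple comparison `a > b` on int triples (exact lexicographic order)
def pyTuple3Gt (a b : Int × Int × Int) : Bool :=
  b.1 < a.1 || (b.1 == a.1 && (b.2.1 < a.2.1 || (b.2.1 == a.2.1 && b.2.2 < a.2.2)))

def select_block_group_alt (positions : List (List (Int × Int × Int))) : List (Int × Int × Int) :=
  let best :=
    positions.foldl (fun (st : Option ((Int × Int × Int) × List (Int × Int × Int))) position =>
      let rainbow : Int := (position.countP (fun pp => pp.2.2 == 0) : Nat)
      let rows := (position.filter (fun pp => pp.2.2 ≠ 0)).map (fun pp => pp.1)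
      let cols := (position.filter (fun pp => pp.2.2 ≠ 0)).map (fun pp => pp.2.1)
      let key : Int × Int × Int :=
        (rainbow, (PySem.List.min? rows (fun x => x)).getD 0,
                  (PySem.List.min? cols (fun x => x)).getD 0)
      match st with
      | none => some (key, position)
      | some (bk, bp) => if pyTuple3Gt key bk then some (key, position) else some (bk, bp)) none
  match best with
  | some (_, p) => p
  | none => []

-- ===== PRECONDITION & SPEC =====
-- Pre_ excludes exactly the inputs where Python A raises: the empty list (IndexError on can[0])
-- and inputs containing a group with no non-rainbow block (min([]) raises ValueError).
def Pre_select_block_group (positions : List (List (Int × Int × Int))) : Prop :=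
  positions ≠ [] ∧ ∀ g ∈ positions, ∃ pp ∈ g, pp.2.2 ≠ 0
instance (positions : List (List (Int × Int × Int))) : Decidable (Pre_select_block_group positions) := by unfold Pre_select_block_group; infer_instance

def pvWitness_select_block_group : (List (List (Int × Int × Int))) :=
  [[(1, 2, 3), (0, 0, 0)], [(2, 1, 1)]]

def Spec_select_block_group (positions : List (List (Int × Int × Int))) (out : List (Int × Int × Int)) : Prop := out = select_block_group_alt positions
instance (positions : List (List (Int × Int × Int))) (out : List (Int × Int × Int)) : Decidable (Spec_select_block_group positions out) := by unfold Spec_select_block_group; infer_instance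

-- ===== CLAIM (what is proved, stated in full; the proofs are below) =====
def Claim_equal_select_block_group : Prop := ∀ (positions : List (List (Int × Int × Int))), Dom_select_block_group positions → Pre_select_block_group positions → Spec_select_block_group positions (select_block_group positions)

-- ===== LEMMAS AND PROOFS =====


-- helper names for the proof (not used by the ports)
def pvEntry (q : Int × List (Int × Int × Int)) : Int × Int × Int × Int × Int :=
  (q.1, (q.2.length : Int), ((q.2.countP (fun pp => pp.2.2 == 0) : Nat) : Int),
   (PySem.List.min? ((q.2.filter (fun pp => pp.2.2 ≠ 0)).map (fun pp => pp.1)) (fun x => x)).getD 0,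
   (PySem.List.min? ((q.2.filter (fun pp => pp.2.2 ≠ 0)).map (fun pp => pp.2.1)) (fun x => x)).getD 0)

def pvKeyOf (x : Int × Int × Int × Int × Int) : Int ×ₗ Int ×ₗ Int :=
  toLex (x.2.2.1, toLex (x.2.2.2.1, x.2.2.2.2))

def pvStepA (st : Option (Int × Int × Int × Int × Int)) (x : Int × Int × Int × Int × Int) :
    Option (Int × Int × Int × Int × Int) :=
  match st with
  | none => some x
  | some y => if decide (pvKeyOf y < pvKeyOf x) then some x else some y

def pvL (t : Int × Int × Int) : Int ×ₗ Int ×ₗ Int := toLex (t.1, toLex (t.2.1, t.2.2))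

def pvT (c : Int × Int × Int × Int × Int) : Int × Int × Int := (c.2.2.1, c.2.2.2.1, c.2.2.2.2)

def pvStepB (st : Option ((Int × Int × Int) × List (Int × Int × Int)))
    (position : List (Int × Int × Int)) :
    Option ((Int × Int × Int) × List (Int × Int × Int)) :=
  let rainbow : Int := (position.countP (fun pp => pp.2.2 == 0) : Nat)
  let rows := (position.filter (fun pp => pp.2.2 ≠ 0)).map (fun pp => pp.1)
  let cols := (position.filter (fun pp => pp.2.2 ≠ 0)).map (fun pp => pp.2.1)
  let key : Int × Int × Int :=
    (rainbow, (PySem.List.min? rows (fun x => x)).getD 0,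
              (PySem.List.min? cols (fun x => x)).getD 0)
  match st with
  | none => some (key, position)
  | some (bk, bp) => if pyTuple3Gt key bk then some (key, position) else some (bk, bp)

def pvRel (positions : List (List (Int × Int × Int)))
    (stA : Option (Int × Int × Int × Int × Int))
    (stB : Option ((Int × Int × Int) × List (Int × Int × Int))) : Prop :=
  match stA, stB with
  | none, none => True
  | some c, some kp => kp.1 = pvT c ∧ PySem.List.pyGet? positions c.1 = some kp.2
  | _, _ => False

def pvKey (g : List (Int × Int × Int)) : Int × Int × Int :=
  (((g.countP (fun pp => pp.2.2 == 0) : Nat) : Int),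
   (PySem.List.min? ((g.filter (fun pp => pp.2.2 ≠ 0)).map (fun pp => pp.1)) (fun x => x)).getD 0,
   (PySem.List.min? ((g.filter (fun pp => pp.2.2 ≠ 0)).map (fun pp => pp.2.1)) (fun x => x)).getD 0)

theorem pvStepB_eq (st : Option ((Int × Int × Int) × List (Int × Int × Int)))
    (g : List (Int × Int × Int)) :
    pvStepB st g = match st with
      | none => some (pvKey g, g)
      | some (bk, bp) => if pyTuple3Gt (pvKey g) bk then some (pvKey g, g) else some (bk, bp) := by
  cases st with
  | none => rfl
  | some kp => rfl

theorem pv_gt_iff (a b : Int × Int × Int) :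
    pyTuple3Gt a b = decide (pvL b < pvL a) := by
  rw [Bool.eq_iff_iff]
  simp only [pyTuple3Gt, pvL, Prod.Lex.toLex_lt_toLex, Bool.or_eq_true, Bool.and_eq_true,
    decide_eq_true_eq, beq_iff_eq]

theorem pvT_pvEntry (q : Int × List (Int × Int × Int)) : pvT (pvEntry q) = pvKey q.2 := rfl

theorem pvKeyOf_eq_pvL (c : Int × Int × Int × Int × Int) : pvKeyOf c = pvL (pvT c) := rfl

theorem pv_inner (g : List (Int × Int × Int)) (r : Int) (rs cs : List Int) :
    g.foldl (fun s pp => if pp.2.2 = 0 then (s.1 + 1, s.2.1, s.2.2)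
                         else (s.1, s.2.1 ++ [pp.1], s.2.2 ++ [pp.2.1])) (r, rs, cs)
    = (r + ((g.countP (fun pp => pp.2.2 == 0) : Nat) : Int),
       rs ++ (g.filter (fun pp => pp.2.2 ≠ 0)).map (fun pp => pp.1),
       cs ++ (g.filter (fun pp => pp.2.2 ≠ 0)).map (fun pp => pp.2.1)) := by
  induction g generalizing r rs cs with
  | nil => simp
  | cons pp t ih =>
    by_cases h : pp.2.2 = 0 <;> simp [h, ih] <;> omega

theorem pv_A_eq (positions : List (List (Int × Int × Int))) :
    select_block_group positions =
      (PySem.List.pyGet? positions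
        ((PySem.List.sorted ((PySem.List.enumerate positions).map pvEntry) pvKeyOf true).headD
          (0, 0, 0, 0, 0)).1).getD [] := by
  unfold select_block_group
  simp only [pv_inner, zero_add, List.nil_append]
  rw [PySem.List.foldl_append_singleton_eq_map]
  rfl

theorem pv_insertBy_head {α : Type} (before : α → α → Bool) (x : α) (ys : List α) :
    (PySem.List.insertBy before x ys).head? =
      some (match ys.head? with | none => x | some y => if before x y then x else y) := by
  cases ys with
  | nil => simp [PySem.List.insertBy]
  | cons y t => by_cases h : before x y <;> simp [PySem.List.insertBy, h]

theorem pv_foldl_insert_head {α : Type} (before : α → α → Bool) (L : List α) (acc : List α) :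
    (L.foldl (fun acc x => PySem.List.insertBy before x acc) acc).head? =
      L.foldl (fun st x => match st with
                | none => some x
                | some y => if before x y then some x else some y) acc.head? := by
  induction L generalizing acc with
  | nil => rfl
  | cons x t ih =>
    rw [List.foldl_cons, List.foldl_cons, ih]
    congr 1
    rw [pv_insertBy_head]
    cases h : acc.head? with
    | none => rfl
    | some v => by_cases hb : before x v <;> simp [hb]

theorem pv_some (L : List (Int × List (Int × Int × Int)))
    (stA : Option (Int × Int × Int × Int × Int)) (h : stA.isSome ∨ L ≠ []) :
    (L.foldl (fun st q => pvStepA st (pvEntry q)) stA).isSome := by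
  induction L generalizing stA with
  | nil => simpa using h.resolve_right (by simp)
  | cons q t ih =>
    rw [List.foldl_cons]
    apply ih
    left
    cases stA with
    | none => rfl
    | some y => simp only [pvStepA]; split <;> rfl

theorem pv_main (positions : List (List (Int × Int × Int)))
    (L : List (Int × List (Int × Int × Int)))
    (hL : ∀ q ∈ L, PySem.List.pyGet? positions q.1 = some q.2) :
    ∀ stA stB, pvRel positions stA stB →
      pvRel positions (L.foldl (fun st q => pvStepA st (pvEntry q)) stA)
        (L.foldl (fun st q => pvStepB st q.2) stB) := by
  induction L with
  | nil => intro stA stB h; exact h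
  | cons q t ih =>
    intro stA stB h
    rw [List.foldl_cons, List.foldl_cons]
    apply ih (fun p hp => hL p (List.mem_cons_of_mem _ hp))
    have hq : PySem.List.pyGet? positions q.1 = some q.2 := hL q (List.mem_cons_self ..)
    rw [pvStepB_eq]
    cases stA with
    | none =>
      cases stB with
      | none => exact ⟨rfl, hq⟩
      | some kp => exact absurd h (by simp [pvRel])
    | some c =>
      cases stB with
      | none => exact absurd h (by simp [pvRel])
      | some kp =>
        obtain ⟨hk, hp⟩ := h
        simp only [pvStepA, hk, pv_gt_iff, pvKeyOf_eq_pvL, pvT_pvEntry]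
        by_cases hlt : pvL (pvT c) < pvL (pvKey q.2) <;> simp only [hlt, decide_true,
          decide_false, if_true]
        · exact ⟨rfl, hq⟩
        · exact ⟨rfl, hp⟩

theorem pv_sorted_head (xs : List (Int × Int × Int × Int × Int)) :
    (PySem.List.sorted xs pvKeyOf true).head? = xs.foldl pvStepA none := by
  rw [PySem.List.sorted_rev_eq_foldl_insertBy, pv_foldl_insert_head]
  congr 1 <;> first
    | rfl
    | (funext st x; cases st <;> rfl)

theorem pv_A_of_fold (positions : List (List (Int × Int × Int)))
    (c : Int × Int × Int × Int × Int)
    (hc : (PySem.List.enumerate positions).foldl (fun st q => pvStepA st (pvEntry q)) none = some c) :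
    select_block_group positions = (PySem.List.pyGet? positions c.1).getD [] := by
  rw [pv_A_eq, List.headD_eq_head?_getD, pv_sorted_head, List.foldl_map, hc]
  rfl

-- ===== VERDICT (by name: the statement is the Claim_ definition above) =====
theorem select_block_group_spec : Claim_equal_select_block_group := by
  unfold Claim_equal_select_block_group
  intro positions _ hpre
  unfold Spec_select_block_group
  obtain ⟨hne, -⟩ := hpre
  have hL : ∀ q ∈ PySem.List.enumerate positions,
      PySem.List.pyGet? positions q.1 = some q.2 := by
    intro q hq
    rw [PySem.List.mem_enumerate_iff] at hq
    obtain ⟨k, hk, rfl⟩ := hq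
    simp [List.getElem?_eq_getElem hk]
  have hmain := pv_main positions (PySem.List.enumerate positions) hL none none trivial
  have hBe : positions.foldl pvStepB none =
      (PySem.List.enumerate positions).foldl (fun st q => pvStepB st q.2) none := by
    conv_lhs => rw [← PySem.List.map_snd_enumerate positions 0]
    rw [List.foldl_map]
  have hB : select_block_group_alt positions =
      ((PySem.List.enumerate positions).foldl (fun st q => pvStepB st q.2) none).elim []
        (fun kp => kp.2) := by
    rw [← hBe]
    show (match positions.foldl pvStepB none with
          | some (_, p) => p
          | none => []) = _
    rcases positions.foldl pvStepB none with - | ⟨bk, bp⟩ <;> rfl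
  have henil : PySem.List.enumerate positions ≠ [] := by
    intro h0
    apply hne
    have := congrArg List.length h0
    rw [PySem.List.length_enumerate] at this
    simpa using this
  have hsome := pv_some (PySem.List.enumerate positions) none (Or.inr henil)
  cases hsA : (PySem.List.enumerate positions).foldl (fun st q => pvStepA st (pvEntry q)) none with
  | none => rw [hsA] at hsome; simp at hsome
  | some c =>
    rw [pv_A_of_fold positions c hsA, hB]
    rw [hsA] at hmain
    cases hsB : (PySem.List.enumerate positions).foldl (fun st q => pvStepB st q.2) none with
    | none => rw [hsB] at hmain; exact absurd hmain (by simp [pvRel])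
    | some kp =>
      rw [hsB] at hmain
      obtain ⟨-, hp⟩ := hmain
      simp [hp]
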